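-- pv_equiv track=rewrite | github.com/Geon-05/dailycoding | programmers_코딩테스트/01_기초/day21/day21_2.py | solution
-- ===== SOURCE A (Python) =====
-- def solution(rank, attendance):
--     answer = 0
--     tmp = {}
--     tmp_list = []
--     for i in range(len(rank)):
--         tmp[rank[i]*attendance[i]] = i
--     for key in sorted(tmp.keys()):
--         if key != 0:
--             tmp_list.append(tmp[key])
--     answer = tmp_list[0] * 10000 + tmp_list[1] * 100 + tmp_list[2]
--     return answer
-- ===== SOURCE B (Python) =====
-- def _min_nonzero_above(keys, lower):
--     best = None
--     for key in keys:
--         if key != 0 and (lower is None or key > lower) and (best is None or key < best):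
--             best = key
--     return best
--
--
-- def solution(rank, attendance):
--     tmp = {}
--     for i in range(len(rank)):
--         tmp[rank[i] * attendance[i]] = i
--     answer = 0
--     lower = None
--     for mult in (10000, 100, 1):
--         best = _min_nonzero_above(tmp.keys(), lower)
--         answer += tmp[best] * mult
--         lower = best
--     return answer
-- ===== Notes on version B (the rewrite author's own statement) =====
-- stated objective: alternative
-- what changed: Instead of sorting all dict keys and filtering, B selects the three smallest distinct nonzero products by three threshold-bounded minimum scans over the keys (no sort), accumulating the answer on the fly.
import Mathlib
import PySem

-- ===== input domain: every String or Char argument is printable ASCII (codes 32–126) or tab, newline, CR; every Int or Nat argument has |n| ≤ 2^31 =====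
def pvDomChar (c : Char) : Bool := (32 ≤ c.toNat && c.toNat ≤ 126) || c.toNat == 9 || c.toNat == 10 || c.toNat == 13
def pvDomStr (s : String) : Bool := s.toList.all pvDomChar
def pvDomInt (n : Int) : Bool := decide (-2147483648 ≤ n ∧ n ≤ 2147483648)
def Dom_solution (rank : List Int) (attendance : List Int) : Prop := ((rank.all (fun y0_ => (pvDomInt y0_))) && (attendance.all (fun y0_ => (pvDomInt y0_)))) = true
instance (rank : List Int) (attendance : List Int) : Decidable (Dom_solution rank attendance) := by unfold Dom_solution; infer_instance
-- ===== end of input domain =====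

-- B replaces the full sort of the keys by three threshold-bounded minimum scans; objective: alternative (no sort).

-- ===== PORT A =====
def solution (rank : List Int) (attendance : List Int) : Int :=
  -- tmp = {}; for i in range(len(rank)): tmp[rank[i]*attendance[i]] = i
  let tmp : PySem.Dict Int Int :=
    (PySem.List.pyRange 0 (PySem.List.len rank) 1).foldl
      (fun d i => d.insert (PySem.List.pyGetD rank i 0 * PySem.List.pyGetD attendance i 0) i)
      PySem.Dict.empty
  -- for key in sorted(tmp.keys()): if key != 0: tmp_list.append(tmp[key])
  let tmpList : List Int :=
    (PySem.List.sorted tmp.keys (fun k => k) false).foldl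
      (fun acc key => if key != 0 then acc ++ [tmp.getD key 0] else acc) []
  -- answer = tmp_list[0]*10000 + tmp_list[1]*100 + tmp_list[2]
  -- (pyGetD / getD are the total forms of indexing; Pre_solution puts every access in range)
  PySem.List.pyGetD tmpList 0 0 * 10000 + PySem.List.pyGetD tmpList 1 0 * 100 +
    PySem.List.pyGetD tmpList 2 0

-- ===== PORT B =====
-- helper _min_nonzero_above(keys, lower): linear scan for the least nonzero key above `lower`
def minNonzeroAbove (keys : List Int) (lower : Option Int) : Option Int :=
  keys.foldl
    (fun best key =>
      if (key != 0) && (match lower with | none => true | some lo => decide (lo < key))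
          && (match best with | none => true | some b => decide (key < b))
      then some key else best)
    none

def solution_alt (rank : List Int) (attendance : List Int) : Int :=
  let tmp : PySem.Dict Int Int :=
    (PySem.List.pyRange 0 (PySem.List.len rank) 1).foldl
      (fun d i => d.insert (PySem.List.pyGetD rank i 0 * PySem.List.pyGetD attendance i 0) i)
      PySem.Dict.empty
  -- for mult in (10000, 100, 1): best = _min_nonzero_above(tmp.keys(), lower); answer += tmp[best]*mult; lower = best
  let st :=
    ([10000, 100, 1] : List Int).foldl
      (fun (st : Int × Option Int) mult =>
        match minNonzeroAbove tmp.keys st.2 with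
        | some k => (st.1 + tmp.getD k 0 * mult, some k)
        | none => st)   -- Python's tmp[None] raises KeyError here; Pre_solution excludes it
      (0, none)
  st.1

-- ===== PRECONDITION & SPEC =====
-- Pre_solution holds exactly where the Python A returns: every attendance[i] access is in
-- range and there are at least three distinct nonzero products (else tmp_list[...] raises).
def Pre_solution (rank : List Int) (attendance : List Int) : Prop :=
  rank.length ≤ attendance.length ∧
  3 ≤ ((PySem.Set.ofList
          ((List.range rank.length).map
            (fun i => rank.getD i 0 * attendance.getD i 0))).filter
        (fun k => k != 0)).length
instance (rank : List Int) (attendance : List Int) : Decidable (Pre_solution rank attendance) := by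
  unfold Pre_solution; infer_instance

def pvWitness_solution : List Int × List Int := ([1, 2, 3], [1, 1, 1])

def Spec_solution (rank : List Int) (attendance : List Int) (out : Int) : Prop := out = solution_alt rank attendance
instance (rank : List Int) (attendance : List Int) (out : Int) : Decidable (Spec_solution rank attendance out) := by unfold Spec_solution; infer_instance

-- ===== CLAIM (what is proved, stated in full; the proofs are below) =====
def Claim_equal_solution : Prop := ∀ (rank : List Int) (attendance : List Int), Dom_solution rank attendance → Pre_solution rank attendance → Spec_solution rank attendance (solution rank attendance)

-- ===== LEMMAS AND PROOFS =====

-- the scan condition of B's helper: key is nonzero and above the threshold `lo`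
def Good (lo : Option Int) (k : Int) : Bool :=
  (k != 0) && (match lo with | none => true | some l => decide (l < k))

-- one step of B's inner scan, named for the induction
def scanStep (lo : Option Int) (best : Option Int) (key : Int) : Option Int :=
  if Good lo key && (match best with | none => true | some b => decide (key < b))
  then some key else best

theorem minNonzeroAbove_eq_foldl (keys : List Int) (lo : Option Int) :
    minNonzeroAbove keys lo = keys.foldl (scanStep lo) none := by
  unfold minNonzeroAbove scanStep Good
  congr 1
  funext best key
  cases lo <;> rfl

-- loop invariant of the scan: either nothing qualified (and any initial best bounds all
-- qualifying elements), or the result is the least qualifying element seen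
theorem scan_inv (lo : Option Int) (keys : List Int) (init : Option Int) :
    (keys.foldl (scanStep lo) init = init ∧
      ∀ y ∈ keys, Good lo y = true → ∃ b, init = some b ∧ b ≤ y) ∨
    (∃ m, keys.foldl (scanStep lo) init = some m ∧ m ∈ keys ∧ Good lo m = true ∧
      (∀ y ∈ keys, Good lo y = true → m ≤ y) ∧ ∀ b, init = some b → m < b) := by
  induction keys generalizing init with
  | nil => exact Or.inl ⟨rfl, by simp⟩
  | cons key keys ih =>
    simp only [List.foldl_cons]
    cases init with
    | none =>
      by_cases hg : Good lo key = true
      · have hstep : scanStep lo none key = some key := by simp [scanStep, hg]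
        rw [hstep]
        rcases ih (some key) with ⟨heq, hall⟩ | ⟨m, hm, hmem, hgm, hmin, hlt⟩
        · refine Or.inr ⟨key, heq, List.mem_cons_self, hg, ?_, by intro b hb; cases hb⟩
          intro y hy hgy
          rcases List.mem_cons.mp hy with rfl | hy
          · exact le_rfl
          · obtain ⟨b, hb, hle⟩ := hall y hy hgy
            cases hb; exact hle
        · refine Or.inr ⟨m, hm, List.mem_cons_of_mem _ hmem, hgm, ?_, by intro b hb; cases hb⟩
          intro y hy hgy
          rcases List.mem_cons.mp hy with rfl | hy
          · exact le_of_lt (hlt y rfl)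
          · exact hmin y hy hgy
      · have hstep : scanStep lo none key = none := by simp [scanStep, hg]
        rw [hstep]
        rcases ih none with ⟨heq, hall⟩ | ⟨m, hm, hmem, hgm, hmin, hlt⟩
        · refine Or.inl ⟨heq, ?_⟩
          intro y hy hgy
          rcases List.mem_cons.mp hy with rfl | hy
          · exact absurd hgy hg
          · exact hall y hy hgy
        · refine Or.inr ⟨m, hm, List.mem_cons_of_mem _ hmem, hgm, ?_, hlt⟩
          intro y hy hgy
          rcases List.mem_cons.mp hy with rfl | hy
          · exact absurd hgy hg
          · exact hmin y hy hgy
    | some b0 =>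
      by_cases hc : (Good lo key && decide (key < b0)) = true
      · obtain ⟨hg, hkb'⟩ : Good lo key = true ∧ key < b0 := by simpa using hc
        have hstep : scanStep lo (some b0) key = some key := by simp [scanStep, hg, hkb']
        rw [hstep]
        rcases ih (some key) with ⟨heq, hall⟩ | ⟨m, hm, hmem, hgm, hmin, hlt⟩
        · refine Or.inr ⟨key, heq, List.mem_cons_self, hg, ?_, ?_⟩
          · intro y hy hgy
            rcases List.mem_cons.mp hy with rfl | hy
            · exact le_rfl
            · obtain ⟨b, hb, hle⟩ := hall y hy hgy
              cases hb; exact hle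
          · intro b hb; cases hb; exact hkb'
        · refine Or.inr ⟨m, hm, List.mem_cons_of_mem _ hmem, hgm, ?_, ?_⟩
          · intro y hy hgy
            rcases List.mem_cons.mp hy with rfl | hy
            · exact le_of_lt (hlt y rfl)
            · exact hmin y hy hgy
          · intro b hb; cases hb; exact lt_trans (hlt key rfl) hkb'
      · have hstep : scanStep lo (some b0) key = some b0 := by
          simp [scanStep, hc]
        rw [hstep]
        have hbk : Good lo key = true → b0 ≤ key := by
          intro hg
          by_contra hnot
          exact hc (by simp [hg]; omega)
        rcases ih (some b0) with ⟨heq, hall⟩ | ⟨m, hm, hmem, hgm, hmin, hlt⟩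
        · refine Or.inl ⟨heq, ?_⟩
          intro y hy hgy
          rcases List.mem_cons.mp hy with rfl | hy
          · exact ⟨b0, rfl, hbk hgy⟩
          · exact hall y hy hgy
        · refine Or.inr ⟨m, hm, List.mem_cons_of_mem _ hmem, hgm, ?_, hlt⟩
          intro y hy hgy
          rcases List.mem_cons.mp hy with rfl | hy
          · exact le_of_lt (lt_of_lt_of_le (hlt b0 rfl) (hbk hgy))
          · exact hmin y hy hgy

theorem scan_some_spec (lo : Option Int) (keys : List Int) (m : Int)
    (h : minNonzeroAbove keys lo = some m) :
    m ∈ keys ∧ Good lo m = true ∧ ∀ y ∈ keys, Good lo y = true → m ≤ y := by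
  rw [minNonzeroAbove_eq_foldl] at h
  rcases scan_inv lo keys none with ⟨heq, _⟩ | ⟨m', hm', hmem, hgm, hmin, _⟩
  · rw [heq] at h; cases h
  · rw [hm'] at h
    injection h with h
    subst h
    exact ⟨hmem, hgm, hmin⟩

theorem scan_isSome (lo : Option Int) (keys : List Int) (y : Int)
    (hy : y ∈ keys) (hg : Good lo y = true) : ∃ m, minNonzeroAbove keys lo = some m := by
  rw [minNonzeroAbove_eq_foldl]
  rcases scan_inv lo keys none with ⟨_, hall⟩ | ⟨m, hm, _⟩
  · obtain ⟨b, hb, _⟩ := hall y hy hg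
    cases hb
  · exact ⟨m, hm⟩

-- the heart of the equivalence, for an arbitrary dict with distinct keys
theorem core (d : PySem.Dict Int Int) (hnd : d.keys.Nodup)
    (h3 : 3 ≤ ((PySem.List.sorted d.keys (fun k => k) false).filter (fun k => k != 0)).length) :
    PySem.List.pyGetD ((PySem.List.sorted d.keys (fun k => k) false).foldl
        (fun acc key => if key != 0 then acc ++ [d.getD key 0] else acc) []) 0 0 * 10000 +
      PySem.List.pyGetD ((PySem.List.sorted d.keys (fun k => k) false).foldl
        (fun acc key => if key != 0 then acc ++ [d.getD key 0] else acc) []) 1 0 * 100 +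
      PySem.List.pyGetD ((PySem.List.sorted d.keys (fun k => k) false).foldl
        (fun acc key => if key != 0 then acc ++ [d.getD key 0] else acc) []) 2 0
    = (([10000, 100, 1] : List Int).foldl
        (fun (st : Int × Option Int) mult =>
          match minNonzeroAbove d.keys st.2 with
          | some k => (st.1 + d.getD k 0 * mult, some k)
          | none => st) (0, none)).1 := by
  have hfold : (PySem.List.sorted d.keys (fun k => k) false).foldl
      (fun acc key => if key != 0 then acc ++ [d.getD key 0] else acc) []
      = ((PySem.List.sorted d.keys (fun k => k) false).filter (fun k => k != 0)).map
          (fun k => d.getD k 0) := by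
    simpa using PySem.List.foldl_append_if (fun k => k != 0) (fun k => d.getD k 0)
      (PySem.List.sorted d.keys (fun k => k) false) []
  have hpwS : (PySem.List.sorted d.keys (fun k => k) false).Pairwise (fun a b => a ≤ b) :=
    PySem.List.sorted_pairwise d.keys (fun k => k)
  have hndS : (PySem.List.sorted d.keys (fun k => k) false).Nodup :=
    (PySem.List.sorted_perm d.keys (fun k => k) false).nodup_iff.mpr hnd
  have hpwlt : ((PySem.List.sorted d.keys (fun k => k) false).filter (fun k => k != 0)).Pairwise
      (fun a b => a < b) := by
    refine List.Pairwise.filter _ ?_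
    exact (hpwS.and hndS).imp (fun h => lt_of_le_of_ne h.1 h.2)
  have hmemL : ∀ x : Int, x ∈ (PySem.List.sorted d.keys (fun k => k) false).filter (fun k => k != 0)
      ↔ (x ∈ d.keys ∧ x ≠ 0) := by
    intro x
    simp [List.mem_filter, PySem.List.mem_sorted]
  obtain ⟨k0, k1, k2, rest, hL⟩ : ∃ a b c r,
      (PySem.List.sorted d.keys (fun k => k) false).filter (fun k => k != 0) = a :: b :: c :: r := by
    rcases hE : (PySem.List.sorted d.keys (fun k => k) false).filter (fun k => k != 0) with
      _ | ⟨a, _ | ⟨b, _ | ⟨c, r⟩⟩⟩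
    · rw [hE] at h3; simp at h3
    · rw [hE] at h3; simp at h3
    · rw [hE] at h3; simp at h3
    · exact ⟨a, b, c, r, rfl⟩
  rw [hL] at hfold hpwlt hmemL
  obtain ⟨h0all, hpw1⟩ := List.pairwise_cons.mp hpwlt
  obtain ⟨h1all, hpw2⟩ := List.pairwise_cons.mp hpw1
  obtain ⟨h2all, _⟩ := List.pairwise_cons.mp hpw2
  have hk0 : k0 ∈ d.keys ∧ k0 ≠ 0 := (hmemL k0).mp (by simp)
  have hk1 : k1 ∈ d.keys ∧ k1 ≠ 0 := (hmemL k1).mp (by simp)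
  have hk2 : k2 ∈ d.keys ∧ k2 ≠ 0 := (hmemL k2).mp (by simp)
  have hk01 : k0 < k1 := h0all k1 (by simp)
  have hk12 : k1 < k2 := h1all k2 (by simp)
  -- first scan returns k0
  obtain ⟨m1, hm1⟩ := scan_isSome none d.keys k0 hk0.1 (by simp [Good, hk0.2])
  have hm1k0 : m1 = k0 := by
    obtain ⟨hmk, hgm, hmin⟩ := scan_some_spec none d.keys m1 hm1
    have hle : m1 ≤ k0 := hmin k0 hk0.1 (by simp [Good, hk0.2])
    have hmem : m1 ∈ (k0 :: k1 :: k2 :: rest : List Int) :=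
      (hmemL m1).mpr ⟨hmk, by simpa [Good] using hgm⟩
    rcases List.mem_cons.mp hmem with rfl | h
    · rfl
    · have := h0all m1 h; omega
  rw [hm1k0] at hm1
  -- second scan (above k0) returns k1
  obtain ⟨m2, hm2⟩ := scan_isSome (some k0) d.keys k1 hk1.1 (by simp [Good, hk1.2, hk01])
  have hm2k1 : m2 = k1 := by
    obtain ⟨hmk, hgm, hmin⟩ := scan_some_spec (some k0) d.keys m2 hm2
    obtain ⟨hne, hgt⟩ : m2 ≠ 0 ∧ k0 < m2 := by simpa [Good] using hgm
    have hle : m2 ≤ k1 := hmin k1 hk1.1 (by simp [Good, hk1.2, hk01])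
    have hmem : m2 ∈ (k0 :: k1 :: k2 :: rest : List Int) := (hmemL m2).mpr ⟨hmk, hne⟩
    rcases List.mem_cons.mp hmem with rfl | h
    · omega
    · rcases List.mem_cons.mp h with rfl | h'
      · rfl
      · have := h1all m2 h'; omega
  rw [hm2k1] at hm2
  -- third scan (above k1) returns k2
  obtain ⟨m3, hm3⟩ := scan_isSome (some k1) d.keys k2 hk2.1 (by simp [Good, hk2.2, hk12])
  have hm3k2 : m3 = k2 := by
    obtain ⟨hmk, hgm, hmin⟩ := scan_some_spec (some k1) d.keys m3 hm3
    obtain ⟨hne, hgt⟩ : m3 ≠ 0 ∧ k1 < m3 := by simpa [Good] using hgm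
    have hle : m3 ≤ k2 := hmin k2 hk2.1 (by simp [Good, hk2.2, hk12])
    have hmem : m3 ∈ (k0 :: k1 :: k2 :: rest : List Int) := (hmemL m3).mpr ⟨hmk, hne⟩
    rcases List.mem_cons.mp hmem with rfl | h
    · omega
    · rcases List.mem_cons.mp h with rfl | h'
      · omega
      · rcases List.mem_cons.mp h' with rfl | h''
        · rfl
        · have := h2all m3 h''; omega
  rw [hm3k2] at hm3
  rw [hfold]
  simp only [List.foldl_cons, List.foldl_nil, List.map_cons]
  rw [hm1]
  dsimp only
  rw [hm2]
  dsimp only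
  rw [hm3]
  dsimp only
  simp only [PySem.List.pyGetD_ofNat', List.getD_cons_zero, List.getD_cons_succ]
  push_cast
  ring

-- ===== VERDICT (by name: the statement is the Claim_ definition above) =====
theorem solution_spec : Claim_equal_solution := by
  intro rank attendance _hdom hpre
  obtain ⟨_hlen, hcount⟩ := hpre
  show solution rank attendance = solution_alt rank attendance
  unfold solution solution_alt
  dsimp only
  have hprod : (PySem.List.pyRange 0 (PySem.List.len rank) 1).map
      (fun i => PySem.List.pyGetD rank i 0 * PySem.List.pyGetD attendance i 0)
      = (List.range rank.length).map (fun i => rank.getD i 0 * attendance.getD i 0) := by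
    rw [PySem.List.len_eq, PySem.List.pyRange_zero_natCast, List.map_map]
    refine List.map_congr_left ?_
    intro i _
    simp [Function.comp, PySem.List.pyGetD_natCast]
  have hkeys : ((PySem.List.pyRange 0 (PySem.List.len rank) 1).foldl
      (fun d i => d.insert (PySem.List.pyGetD rank i 0 * PySem.List.pyGetD attendance i 0) i)
      PySem.Dict.empty).keys
      = PySem.Set.ofList ((List.range rank.length).map
          (fun i => rank.getD i 0 * attendance.getD i 0)) := by
    rw [PySem.Dict.keys_foldl_insert_key _
      (fun i => PySem.List.pyGetD rank i 0 * PySem.List.pyGetD attendance i 0)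
      (fun _ i => i) PySem.Dict.empty]
    rw [PySem.Dict.keys_empty, PySem.Set.update_nil_left, hprod]
  have hnd : ((PySem.List.pyRange 0 (PySem.List.len rank) 1).foldl
      (fun d i => d.insert (PySem.List.pyGetD rank i 0 * PySem.List.pyGetD attendance i 0) i)
      PySem.Dict.empty).keys.Nodup := by
    rw [hkeys]; exact PySem.Set.nodup_ofList _
  have h3 : 3 ≤ ((PySem.List.sorted ((PySem.List.pyRange 0 (PySem.List.len rank) 1).foldl
      (fun d i => d.insert (PySem.List.pyGetD rank i 0 * PySem.List.pyGetD attendance i 0) i)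
      PySem.Dict.empty).keys (fun k => k) false).filter (fun k => k != 0)).length := by
    have hperm := ((PySem.List.sorted_perm ((PySem.List.pyRange 0 (PySem.List.len rank) 1).foldl
      (fun d i => d.insert (PySem.List.pyGetD rank i 0 * PySem.List.pyGetD attendance i 0) i)
      PySem.Dict.empty).keys (fun k => k) false).filter (fun k => k != 0)).length_eq
    rw [hperm, hkeys]
    exact hcount
  exact core _ hnd h3
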